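-- pv_equiv track=rewrite | github.com/Vladiuse/rw | rw/containers/containers/container_8_reader.py | is_conaiter8_number_valid
-- ===== SOURCE A (Python) =====
-- def is_conaiter8_number_valid(container_number: str):
--     control_sum = 0
--     for pos, char in enumerate(container_number[:-1]):
--         number = int(char)
--         if pos % 2 == 0:
--             number *= 2
--         if number > 9:
--             number = sum([int(char) for char in str(number)])
--             control_sum += number
--         else:
--             control_sum += number
--     result = (control_sum // 10 + 1) * 10 - control_sum
--     if result == 10:
--         result = 0
--     return str(result) == container_number[-1]
-- ===== SOURCE B (Python) =====
-- WEIGHT_EVEN = (0, 2, 4, 6, 8, 1, 3, 5, 7, 9)  # digit sum of 2*d for d in 0..9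
--
--
-- def is_conaiter8_number_valid(container_number: str):
--     # Frequency method: convert the body to digit values, split into even/odd
--     # strided sublists, then take a weighted dot product over the digit alphabet
--     # 0..9 using per-digit occurrence counts, with a closed-form check digit.
--     values = [int(c) for c in container_number[:-1]]
--     evens = values[::2]
--     odds = values[1::2]
--     control_sum = 0
--     for d in range(10):
--         control_sum += WEIGHT_EVEN[d] * evens.count(d) + d * odds.count(d)
--     return container_number[-1:] == str((10 - control_sum % 10) % 10)
-- ===== Notes on version B (the rewrite author's own statement) =====
-- stated objective: alternative
-- what changed: Replaces the per-character enumerate loop with its parity test and >9 digit-sum branch by a frequency method: the body's digit values are split into even/odd strided sublists and the checksum is a weighted dot product over the digit alphabet 0..9 using per-digit .count occurrences, with the check digit given by the closed form (10 - control_sum % 10) % 10.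
import Mathlib
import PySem

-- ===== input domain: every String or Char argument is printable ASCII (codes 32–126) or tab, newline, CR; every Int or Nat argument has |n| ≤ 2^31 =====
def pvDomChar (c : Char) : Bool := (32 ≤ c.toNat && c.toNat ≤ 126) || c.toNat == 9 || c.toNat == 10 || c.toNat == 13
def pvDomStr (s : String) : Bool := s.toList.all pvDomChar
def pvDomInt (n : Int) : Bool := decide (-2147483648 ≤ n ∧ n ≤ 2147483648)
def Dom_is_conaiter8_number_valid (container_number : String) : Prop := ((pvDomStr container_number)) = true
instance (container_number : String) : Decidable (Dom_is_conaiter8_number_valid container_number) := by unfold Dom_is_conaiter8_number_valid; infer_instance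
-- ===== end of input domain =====

-- B replaces the per-character parity-tested loop by a frequency method: weighted
-- digit counts over the even/odd strided substrings with a closed-form check digit (alternative).


-- ===== PORT A =====
-- step of A's loop body: number = int(char); doubled on even pos; digit-summed if > 9
def pvStepA (acc : Int) (pc : Int × Char) : Int :=
  let number : Int := (PySem.Int.ofChars? [pc.2]).getD 0
  let number : Int := if PySem.Int.mod pc.1 2 = 0 then number * 2 else number
  if number > 9 then
    acc + ((PySem.Int.toChars number).map (fun c => (PySem.Int.ofChars? [c]).getD 0)).sum
  else acc + number

def is_conaiter8_number_valid (container_number : String) : Bool :=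
  let cs := container_number.toList
  let control_sum :=
    (PySem.List.enumerate (PySem.List.slice cs none (some (-1))) 0).foldl pvStepA 0
  let result := (PySem.Int.floordiv control_sum 10 + 1) * 10 - control_sum
  let result := if result = 10 then (0 : Int) else result
  decide (PySem.Int.toChars result = [(PySem.List.pyGet? cs (-1)).getD ' '])

-- ===== PORT B =====
def pvWEIGHT_EVEN : List Int := [0, 2, 4, 6, 8, 1, 3, 5, 7, 9]

-- Source B: values = [int(c) for c in body]; evens = values[::2], odds = values[1::2];
-- then a weighted dot product over the digit alphabet range(10) using list.count.
def is_conaiter8_number_valid_alt (container_number : String) : Bool :=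
  let cs := container_number.toList
  let values := (PySem.List.slice cs none (some (-1))).map
    (fun c => (PySem.Int.ofChars? [c]).getD 0)
  let evens := (PySem.List.slice? values none none 2).getD []
  let odds := (PySem.List.slice? values (some 1) none 2).getD []
  let control_sum := (PySem.List.pyRange 0 10 1).foldl
    (fun acc d => acc +
      ((PySem.List.pyGet? pvWEIGHT_EVEN d).getD 0 * (evens.count d : Int)
        + d * (odds.count d : Int))) 0
  let result := PySem.Int.mod (10 - PySem.Int.mod control_sum 10) 10
  decide (PySem.List.slice cs (some (-1)) none = PySem.Int.toChars result)

-- ===== PRECONDITION & SPEC =====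
-- Pre_: A raises IndexError on the empty string and ValueError when any char of
-- container_number[:-1] is not a decimal digit; exactly those inputs are excluded.
def Pre_is_conaiter8_number_valid (container_number : String) : Prop :=
  container_number.toList ≠ [] ∧
  (container_number.toList.dropLast.all
    (fun c => ['0', '1', '2', '3', '4', '5', '6', '7', '8', '9'].contains c)) = true
instance (container_number : String) : Decidable (Pre_is_conaiter8_number_valid container_number) := by
  unfold Pre_is_conaiter8_number_valid; infer_instance

def pvWitness_is_conaiter8_number_valid : String := "91"

def Spec_is_conaiter8_number_valid (container_number : String) (out : Bool) : Prop := out = is_conaiter8_number_valid_alt container_number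
instance (container_number : String) (out : Bool) : Decidable (Spec_is_conaiter8_number_valid container_number out) := by unfold Spec_is_conaiter8_number_valid; infer_instance

-- ===== CLAIM (what is proved, stated in full; the proofs are below) =====
def Claim_equal_is_conaiter8_number_valid : Prop := ∀ (container_number : String), Dom_is_conaiter8_number_valid container_number → Pre_is_conaiter8_number_valid container_number → Spec_is_conaiter8_number_valid container_number (is_conaiter8_number_valid container_number)

-- ===== LEMMAS AND PROOFS =====

def pvDigits : List Char := ['0', '1', '2', '3', '4', '5', '6', '7', '8', '9']

def pvIDigits : List Int := [0, 1, 2, 3, 4, 5, 6, 7, 8, 9]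

theorem pvIDigits_eq : PySem.List.pyRange 0 10 1 = pvIDigits := by decide

-- the value int(c) of a character, as B's comprehension computes it
def pvVal (c : Char) : Int := (PySem.Int.ofChars? [c]).getD 0

theorem pvVal_def (c : Char) : (PySem.Int.ofChars? [c]).getD 0 = pvVal c := rfl

-- the contribution of one character at a position of parity `even`
def pvContrib (even : Bool) (c : Char) : Int :=
  let number : Int := (PySem.Int.ofChars? [c]).getD 0
  let number : Int := if even then number * 2 else number
  if number > 9 then
    ((PySem.Int.toChars number).map (fun ch => (PySem.Int.ofChars? [ch]).getD 0)).sum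
  else number

def pvAsum (even : Bool) (l : List Char) : Int :=
  match l with
  | [] => 0
  | c :: t => pvContrib even c + pvAsum (!even) t

theorem pvStepA_eq (acc : Int) (p : Int) (c : Char) :
    pvStepA acc (p, c) = acc + pvContrib (decide (PySem.Int.mod p 2 = 0)) c := by
  by_cases h : PySem.Int.mod p 2 = 0 <;>
    simp only [pvStepA, pvContrib, h, decide_true, decide_false, if_true, if_false,
      Bool.false_eq_true] <;>
    split <;> ring

theorem pvMod_succ_flip (s : Int) :
    decide (PySem.Int.mod (s + 1) 2 = 0) = !decide (PySem.Int.mod s 2 = 0) := by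
  rw [PySem.Int.mod_eq_emod_of_pos (a := s + 1) (by norm_num),
      PySem.Int.mod_eq_emod_of_pos (a := s) (by norm_num)]
  by_cases h : s % 2 = 0 <;> simp [h] <;> omega

theorem pvFoldl_enumerate (l : List Char) :
    ∀ (s acc : Int),
    (PySem.List.enumerate l s).foldl pvStepA acc
      = acc + pvAsum (decide (PySem.Int.mod s 2 = 0)) l := by
  induction l with
  | nil => intro s acc; simp [PySem.List.enumerate_nil, pvAsum]
  | cons c t ih =>
      intro s acc
      rw [PySem.List.enumerate_cons, List.foldl_cons, pvStepA_eq,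
          ih (s + 1), pvMod_succ_flip s]
      simp [pvAsum]; ring

-- even weight (the table lookup B does) and odd weight (the digit value itself)
def pvWe (d : Int) : Int := (PySem.List.pyGet? pvWEIGHT_EVEN d).getD 0
def pvWo (d : Int) : Int := d

theorem pvVal_mem (c : Char) (hc : c ∈ pvDigits) : pvVal c ∈ pvIDigits := by
  fin_cases hc <;> decide

theorem pvContrib_even_digit (c : Char) (hc : c ∈ pvDigits) :
    pvContrib true c = pvWe (pvVal c) := by fin_cases hc <;> decide

theorem pvContrib_odd_digit (c : Char) (hc : c ∈ pvDigits) :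
    pvContrib false c = pvWo (pvVal c) := by fin_cases hc <;> decide

-- weighted digit-count sum, the quantity B's loop accumulates for one weight
def pvSsum (w : Int → Int) (l : List Int) : Int :=
  (pvIDigits.map (fun d => w d * (l.count d : Int))).sum

theorem pvSsum_nil (w : Int → Int) : pvSsum w [] = 0 := by
  simp [pvSsum, pvIDigits]

theorem pvSsum_cons (w : Int → Int) (c : Int) (t : List Int) (hc : c ∈ pvIDigits) :
    pvSsum w (c :: t) = w c + pvSsum w t := by
  have hcount : ∀ d : Int, ((c :: t).count d : Int)
      = (t.count d : Int) + (if d = c then 1 else 0) := by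
    intro d
    rw [List.count_cons]
    push_cast
    by_cases hdc : d = c
    · subst hdc; simp
    · simp [Ne.symm hdc, hdc]
  simp only [pvSsum, hcount, mul_add]
  rw [PySem.List.sum_map_add_int]
  have hind : (pvIDigits.map (fun d => w d * (if d = c then 1 else 0))).sum = w c := by
    fin_cases hc <;> simp [pvIDigits]
  rw [hind]; ring

-- even-position sublist (positions 0,2,4,…); xs[1::2] is pvEvens of the tail
def pvEvens {α : Type} : List α → List α
  | [] => []
  | [a] => [a]
  | a :: _ :: t => a :: pvEvens t

theorem pvEvens_cons {α : Type} (x : α) (xs : List α) :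
    pvEvens (x :: xs) = x :: pvEvens xs.tail := by
  cases xs <;> rfl

-- A's alternating sum equals B's two weighted-count sums over the value list
theorem pvAsum_eq_ssum (l : List Char) (hl : ∀ c ∈ l, c ∈ pvDigits) :
    pvAsum true l
      = pvSsum pvWe (pvEvens (l.map pvVal))
        + pvSsum pvWo (pvEvens (l.map pvVal).tail) := by
  induction l using pvEvens.induct with
  | case1 => simp [pvAsum, pvEvens, pvSsum_nil]
  | case2 a =>
      have ha := hl a (by simp)
      simp only [pvAsum, List.map_cons, List.map_nil, pvEvens, List.tail_cons]
      rw [pvContrib_even_digit a ha,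
          pvSsum_cons pvWe (pvVal a) [] (pvVal_mem a ha), pvSsum_nil, pvSsum_nil]
      ring
  | case3 a b t ih =>
      have ha := hl a (by simp)
      have hb := hl b (by simp)
      simp only [pvAsum, List.map_cons, pvEvens, List.tail_cons,
        Bool.not_true, Bool.not_false]
      rw [pvContrib_even_digit a ha, pvContrib_odd_digit b hb,
          ih (fun c hc => hl c (by simp [hc])), pvEvens_cons (pvVal b) (t.map pvVal),
          pvSsum_cons pvWe (pvVal a) (pvEvens (t.map pvVal)) (pvVal_mem a ha),
          pvSsum_cons pvWo (pvVal b) (pvEvens ((t.map pvVal).tail)) (pvVal_mem b hb)]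
      ring

-- the step-2 slice core: indices 0,2,4,… of l
theorem pvFilterMap_two {α : Type} (l : List α) :
    List.filterMap (fun k => l[2 * k]?) (List.range ((l.length + 1) / 2)) = pvEvens l := by
  induction l using pvEvens.induct with
  | case1 => simp [pvEvens]
  | case2 a => simp [pvEvens, List.range_succ]
  | case3 a b t ih =>
      have hlen : (((a :: b :: t).length + 1) / 2) = ((t.length + 1) / 2) + 1 := by
        simp; omega
      rw [hlen, List.range_succ_eq_map, List.filterMap_cons]
      simp only [List.getElem?_cons_zero, Nat.mul_zero]
      rw [List.filterMap_map]
      have harg : ∀ k : Nat, ((a :: b :: t)[2 * (k + 1)]?) = t[2 * k]? := by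
        intro k
        have : 2 * (k + 1) = (2 * k) + 1 + 1 := by omega
        simp [this]
      simp only [Function.comp_def, harg, pvEvens, ih]

theorem pvSlice2_none {α : Type} (l : List α) :
    (PySem.List.slice? l none none 2).getD [] = pvEvens l := by
  simp only [PySem.List.slice?, PySem.List.sliceIndices]
  norm_num
  by_cases h : 0 < l.length
  · rw [if_pos h]
    have hcount : (((l.length : Int) + 2 - 1) / 2).toNat = (l.length + 1) / 2 := by omega
    rw [hcount]
    rw [List.filterMap_congr (g := fun k : Nat => l[2 * k]?) (fun k _ => by congr 1)]
    exact pvFilterMap_two l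
  · rw [if_neg h]
    cases l with
    | nil => simp [pvEvens]
    | cons a t => simp at h

theorem pvSlice2_one {α : Type} (l : List α) :
    (PySem.List.slice? l (some 1) none 2).getD [] = pvEvens l.tail := by
  cases l with
  | nil => rfl
  | cons a t =>
      simp only [PySem.List.slice?, PySem.List.sliceIndices]
      norm_num
      by_cases h : 0 < t.length
      · rw [if_pos h]
        have hcount : ((((t.length : Int)) + 2 - 1) / 2).toNat = (t.length + 1) / 2 := by omega
        rw [hcount]
        rw [List.filterMap_congr (g := fun k : Nat => t[2 * k]?) (fun k _ => by
          have h1 : ((1 : Int) + 2 * (k : Int)).toNat = (2 * k) + 1 := by omega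
          rw [h1]; simp)]
        exact pvFilterMap_two t
      · rw [if_neg h]
        cases t with
        | nil => simp [pvEvens]
        | cons b u => simp at h

-- the two check-digit computations agree for every integer control sum
theorem pvResult_eq (S : Int) :
    (if (PySem.Int.floordiv S 10 + 1) * 10 - S = 10 then (0 : Int)
     else (PySem.Int.floordiv S 10 + 1) * 10 - S)
      = PySem.Int.mod (10 - PySem.Int.mod S 10) 10 := by
  rw [PySem.Int.floordiv_eq_ediv_of_pos (by norm_num),
      PySem.Int.mod_eq_emod_of_pos (a := S) (by norm_num),
      PySem.Int.mod_eq_emod_of_pos (a := 10 - S % 10) (by norm_num)]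
  have h1 : S % 10 + 10 * (S / 10) = S := Int.emod_add_mul_ediv S 10
  have h2 : 0 ≤ S % 10 := Int.emod_nonneg S (by norm_num)
  have h3 : S % 10 < 10 := Int.emod_lt_of_pos S (by norm_num)
  have h4 : (10 - S % 10) % 10 = if S % 10 = 0 then 0 else 10 - S % 10 := by
    split <;> omega
  rw [h4]; split_ifs <;> omega

-- B's foldl over the digit alphabet is the two weighted-count sums
theorem pvFoldlB (e o : List Int) :
    ((PySem.List.pyRange 0 10 1).foldl
      (fun acc d => acc +
        ((PySem.List.pyGet? pvWEIGHT_EVEN d).getD 0 * (e.count d : Int)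
          + d * (o.count d : Int))) 0)
      = pvSsum pvWe e + pvSsum pvWo o := by
  rw [pvIDigits_eq, PySem.List.foldl_add]
  simp only [pvSsum, pvWe, pvWo, zero_add]
  rw [← PySem.List.sum_map_add_int]

-- cs[-1:] equals [cs[-1]] on a nonempty list
theorem pvLastSlice (cs : List Char) (h : cs ≠ []) :
    PySem.List.slice cs (some (-1)) none = [(PySem.List.pyGet? cs (-1)).getD ' '] := by
  rw [PySem.List.slice_from_neg_one]
  have hlen : 0 < cs.length := List.length_pos_iff.mpr h
  have hidx : PySem.List.pyIdx? cs.length (-1) = some (cs.length - 1) := by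
    simp [PySem.List.pyIdx?]; omega
  have hget : PySem.List.pyGet? cs (-1) = some (cs.getLast h) := by
    rw [PySem.List.pyGet?, hidx]
    simp [List.getLast_eq_getElem]
  rw [hget, Option.getD_some, List.drop_length_sub_one h]

-- ===== VERDICT (by name: the statement is the Claim_ definition above) =====
theorem is_conaiter8_number_valid_spec : Claim_equal_is_conaiter8_number_valid := by
  intro container_number _ hpre
  unfold Spec_is_conaiter8_number_valid
  obtain ⟨hne, hdig⟩ := hpre
  have hdig' : ∀ c ∈ container_number.toList.dropLast, c ∈ pvDigits := by
    simpa [List.all_eq_true, pvDigits] using hdig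
  unfold is_conaiter8_number_valid is_conaiter8_number_valid_alt
  simp only [PySem.List.slice_to_neg_one, pvVal_def]
  rw [pvFoldl_enumerate _ 0 0]
  have h0 : decide (PySem.Int.mod 0 2 = 0) = true := by decide
  rw [h0, zero_add, pvSlice2_none, pvSlice2_one, pvFoldlB,
      ← pvAsum_eq_ssum _ hdig', pvResult_eq, pvLastSlice _ hne]
  exact decide_eq_decide.mpr ⟨fun h => h.symm, fun h => h.symm⟩
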